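-- pv_equiv track=rewrite | github.com/LEE-DA-EUN/Auto_CT | 프로그래머스/3/42627. 디스크 컨트롤러/디스크 컨트롤러.py | solution
-- ===== SOURCE A (Python) =====
-- import heapq
--
-- def solution(jobs):
--     jobs.sort()
--     heap = []
--     time, total, i = 0, 0, 0
--     n = len(jobs)
--
--     while i < n or heap:
--         while i < n and jobs[i][0] <= time:
--             heapq.heappush(heap, (jobs[i][1], jobs[i][0]))
--             i += 1
--
--         if heap:
--             j_time, r_time = heapq.heappop(heap)
--             time += j_time
--             total += time - r_time
--         else:
--             time = jobs[i][0]
--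
--     ans = total // n
--     return ans
-- ===== SOURCE B (Python) =====
-- def solution(jobs):
--     jobs.sort()
--     n = len(jobs)
--     remaining = [(j[0], j[1]) for j in jobs]
--     waiting = []
--     time = total = 0
--     while remaining or waiting:
--         waiting += [(d, r) for (r, d) in remaining if r <= time]
--         remaining = [(r, d) for (r, d) in remaining if r > time]
--         if waiting:
--             job = min(waiting)
--             waiting.remove(job)
--             d, r = job
--             time += d
--             total += time - r
--         else:
--             time = remaining[0][0]
--     return total // n
-- ===== Notes on version B (the rewrite author's own statement) =====
-- stated objective: alternative
-- what changed: Replaces A's index-plus-binary-heap simulation by a remaining/waiting two-list simulation: each step filters the arrived jobs out of the sorted remaining list, picks the minimum (duration, request) pair with min() and removes it; no heap and no running index.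
-- outside the precondition, e.g. on solution([]): A raises ZeroDivisionError, B raises ZeroDivisionError; on solution([[5]]): A raises IndexError, B raises IndexError
import Mathlib
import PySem

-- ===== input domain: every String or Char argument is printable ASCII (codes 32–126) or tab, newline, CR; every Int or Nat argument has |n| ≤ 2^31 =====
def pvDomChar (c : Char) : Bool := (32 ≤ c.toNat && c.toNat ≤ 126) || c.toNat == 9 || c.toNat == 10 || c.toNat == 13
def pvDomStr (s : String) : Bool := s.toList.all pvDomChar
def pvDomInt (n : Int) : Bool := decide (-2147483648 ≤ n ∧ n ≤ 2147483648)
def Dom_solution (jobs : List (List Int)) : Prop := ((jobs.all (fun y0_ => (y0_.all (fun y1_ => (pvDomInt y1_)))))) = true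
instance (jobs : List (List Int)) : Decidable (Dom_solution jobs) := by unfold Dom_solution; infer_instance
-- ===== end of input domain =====

-- B replaces A's running-index-plus-binary-heap simulation by a two-list simulation
-- (sorted `remaining` jobs filtered into an unordered `waiting` pool, min()/remove()
-- selection); objective: alternative algorithmic machinery, same schedule.
-- Both Pythons sort `jobs` in place; the equivalence proved is about the RETURN value
-- (the in-place mutation is the same on both sides: both call jobs.sort()).

-- ===== PORT A =====
-- Python tuple comparison (d, r) < (d', r') on (duration, request) pairs.
def pairLt (x y : Int × Int) : Bool := x.1 < y.1 || (x.1 == y.1 && x.2 < y.2)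

-- heapq.heappush/heappop modelled by an ascending ordered list: push = ordered insert,
-- pop = head.  Exact for this program: heappop returns the minimum of the pushed
-- multiset, and equal (Int × Int) pairs are indistinguishable values.
def heapPush (x : Int × Int) : List (Int × Int) → List (Int × Int)
  | [] => [x]
  | y :: ys => if pairLt x y then x :: y :: ys else y :: heapPush x ys

-- inner `while i < n and jobs[i][0] <= time: heappush(heap, (jobs[i][1], jobs[i][0]))`
-- (list accesses via getD: Pre_ guarantees every sublist has the two entries)
def pushA (js : List (List Int)) (n : Nat) (time : Int) (i : Nat)
    (heap : List (Int × Int)) : Nat × List (Int × Int) :=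
  if i < n ∧ (js.getD i []).getD 0 0 ≤ time then
    pushA js n time (i + 1) (heapPush ((js.getD i []).getD 1 0, (js.getD i []).getD 0 0) heap)
  else (i, heap)
termination_by n - i
decreasing_by omega

-- outer `while i < n or heap` loop; fuel 2*n+1 bounds the iteration count
-- (every iteration pops one job or jumps, and a jump is followed by a pop).
def outerA (js : List (List Int)) (n : Nat) :
    Nat → Nat → List (Int × Int) → Int → Int → Int
  | 0, _, _, _, total => total
  | fuel + 1, i, heap, time, total =>
    if i < n ∨ heap ≠ [] then
      match pushA js n time i heap with
      | (i', (d, r) :: rest) => outerA js n fuel i' rest (time + d) (total + (time + d - r))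
      | (i', []) => outerA js n fuel i' [] ((js.getD i' []).getD 0 0) total
    else total

def solution (jobs : List (List Int)) : Int :=
  let js := PySem.List.sorted jobs (fun x => x) false
  let n := js.length
  PySem.Int.floordiv (outerA js n (2 * n + 1) 0 [] 0 0) (n : Int)

-- ===== PORT B =====
-- `[(j[0], j[1]) for j in jobs]`
def pairOf (j : List Int) : Int × Int := (j.getD 0 0, j.getD 1 0)

-- B's while loop: state is (remaining, waiting, time, total); each iteration filters
-- the arrived jobs of `remaining` into `waiting` (as (duration, request) pairs),
-- then either extracts min(waiting) via min()/remove() or jumps to remaining[0][0].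
def loopB : Nat → List (Int × Int) → List (Int × Int) → Int → Int → Int
  | 0, _, _, _, total => total
  | fuel + 1, remaining, waiting, time, total =>
    let w := waiting ++ (remaining.filter (fun p => decide (p.1 ≤ time))).map (fun p => (p.2, p.1))
    let rest := remaining.filter (fun p => decide (time < p.1))
    match PySem.List.min2? w Prod.fst Prod.snd with
    | some job =>
      loopB fuel rest ((PySem.List.remove? w job).getD w) (time + job.1)
        (total + (time + job.1 - job.2))
    | none =>
      match rest with
      | [] => total
      | q :: _ => loopB fuel rest [] q.1 total

def solution_alt (jobs : List (List Int)) : Int :=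
  let js := PySem.List.sorted jobs (fun x => x) false
  let n := js.length
  PySem.Int.floordiv (loopB (2 * n + 1) (js.map pairOf) [] 0 0) (n : Int)

-- ===== PRECONDITION & SPEC =====
-- Pre_ excludes exactly the inputs where the Python A raises: jobs = []
-- (ZeroDivisionError at total // n) and any sublist of length < 2
-- (IndexError at jobs[i][0] / jobs[i][1]).
def Pre_solution (jobs : List (List Int)) : Prop :=
  jobs ≠ [] ∧ ∀ j ∈ jobs, 2 ≤ j.length
instance (jobs : List (List Int)) : Decidable (Pre_solution jobs) := by
  unfold Pre_solution; infer_instance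

def pvWitness_solution : List (List Int) := [[0, 3], [1, 9], [2, 6]]

def Spec_solution (jobs : List (List Int)) (out : Int) : Prop := out = solution_alt jobs
instance (jobs : List (List Int)) (out : Int) : Decidable (Spec_solution jobs out) := by
  unfold Spec_solution; infer_instance

-- ===== CLAIM (what is proved, stated in full; the proofs are below) =====
def Claim_equal_solution : Prop :=
  ∀ (jobs : List (List Int)), Dom_solution jobs → Pre_solution jobs →
    Spec_solution jobs (solution jobs)

-- ===== LEMMAS AND PROOFS =====

-- `a ≤ b` on pairs, as the negation of Python's tuple `<`
def pLe (a b : Int × Int) : Prop := pairLt b a = false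

theorem pairLt_asymm {x y : Int × Int} (h : pairLt x y = true) : pairLt y x = false := by
  rcases x with ⟨a, b⟩; rcases y with ⟨c, d⟩
  simp [pairLt] at h ⊢; omega

theorem pLe_of_not_lt {x y : Int × Int} (h : ¬ pairLt x y = true) : pLe y x := by
  simp [pLe]; exact (Bool.not_eq_true _).mp h

theorem pLe_refl (x : Int × Int) : pLe x x := by
  rcases x with ⟨a, b⟩; simp [pLe, pairLt]

theorem pLe_trans {x y z : Int × Int} (h1 : pLe x y) (h2 : pLe y z) : pLe x z := by
  rcases x with ⟨a, b⟩; rcases y with ⟨c, d⟩; rcases z with ⟨e, f⟩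
  simp [pLe, pairLt] at h1 h2 ⊢; omega

theorem pLe_antisymm {x y : Int × Int} (h1 : pLe x y) (h2 : pLe y x) : x = y := by
  rcases x with ⟨a, b⟩; rcases y with ⟨c, d⟩
  simp [pLe, pairLt] at h1 h2 ⊢; omega

theorem heapPush_perm (x : Int × Int) (h : List (Int × Int)) :
    (heapPush x h).Perm (x :: h) := by
  induction h with
  | nil => simp [heapPush]
  | cons y ys ih =>
    simp only [heapPush]
    split
    · exact List.Perm.refl _
    · exact (ih.cons y).trans (List.Perm.swap x y ys)

theorem heapPush_pairwise (x : Int × Int) (h : List (Int × Int))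
    (hs : h.Pairwise pLe) : (heapPush x h).Pairwise pLe := by
  induction h with
  | nil => simp [heapPush]
  | cons y ys ih =>
    rcases List.pairwise_cons.mp hs with ⟨hy, hys⟩
    simp only [heapPush]
    split
    · rename_i hlt
      refine List.pairwise_cons.mpr ⟨?_, hs⟩
      intro z hz
      rcases List.mem_cons.mp hz with rfl | hz
      · exact pairLt_asymm hlt
      · exact pLe_trans (pairLt_asymm hlt) (hy z hz)
    · rename_i hnlt
      refine List.pairwise_cons.mpr ⟨?_, ih hys⟩
      intro z hz
      have hz' := (heapPush_perm x ys).mem_iff.mp hz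
      rcases List.mem_cons.mp hz' with rfl | hz'
      · exact pLe_of_not_lt hnlt
      · exact hy z hz'

-- min2?'s fold step, with its replacement test written as Python's tuple `<`
def minStep (acc : Option (Int × Int)) (x : Int × Int) : Option (Int × Int) :=
  match acc with
  | none => some x
  | some m => if pairLt x m then some x else some m

theorem min2?_eq_foldl (l : List (Int × Int)) :
    PySem.List.min2? l Prod.fst Prod.snd = List.foldl minStep none l := by
  unfold PySem.List.min2?
  congr 1
  funext acc x
  cases acc with
  | none => rfl
  | some m =>
    simp only [minStep]
    congr 1
    rcases x with ⟨a, b⟩; rcases m with ⟨c, d⟩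
    rw [Bool.eq_iff_iff]
    simp [pairLt]
    omega

theorem min2?_go (l : List (Int × Int)) :
    ∀ m : Int × Int, ∃ m', List.foldl minStep (some m) l = some m' ∧
      (m' = m ∨ m' ∈ l) ∧ pLe m' m ∧ ∀ y ∈ l, pLe m' y := by
  induction l with
  | nil => intro m; exact ⟨m, rfl, Or.inl rfl, pLe_refl m, by simp⟩
  | cons x xs ih =>
    intro m
    simp only [List.foldl_cons, minStep]
    by_cases hx : pairLt x m = true
    · rw [if_pos hx]
      obtain ⟨m', h1, h0, h2, h3⟩ := ih x
      refine ⟨m', h1, ?_, pLe_trans h2 (pairLt_asymm hx), fun y hy => ?_⟩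
      · rcases h0 with rfl | h0
        · exact Or.inr List.mem_cons_self
        · exact Or.inr (List.mem_cons_of_mem _ h0)
      · rcases List.mem_cons.mp hy with rfl | hy
        · exact h2
        · exact h3 y hy
    · rw [if_neg hx]
      obtain ⟨m', h1, h0, h2, h3⟩ := ih m
      refine ⟨m', h1, ?_, h2, fun y hy => ?_⟩
      · rcases h0 with rfl | h0
        · exact Or.inl rfl
        · exact Or.inr (List.mem_cons_of_mem _ h0)
      · rcases List.mem_cons.mp hy with rfl | hy
        · exact pLe_trans h2 (pLe_of_not_lt hx)
        · exact h3 y hy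

-- min2? with fst/snd keys returns the FIRST element minimal in the pLe order
theorem min2?_spec (l : List (Int × Int)) (hl : l ≠ []) :
    ∃ m, PySem.List.min2? l Prod.fst Prod.snd = some m ∧ m ∈ l ∧ ∀ y ∈ l, pLe m y := by
  match l with
  | x :: xs =>
    obtain ⟨m', h1, h0, h2, h3⟩ := min2?_go xs x
    refine ⟨m', ?_, ?_, ?_⟩
    · rw [min2?_eq_foldl]; simpa [minStep] using h1
    · rcases h0 with rfl | h0
      · exact List.mem_cons_self
      · exact List.mem_cons_of_mem _ h0
    · intro y hy
      rcases List.mem_cons.mp hy with rfl | hy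
      · exact h2
      · exact h3 y hy

theorem drop_cons_getD (js : List (List Int)) (i : Nat) (h : i < js.length) :
    js.drop i = js.getD i [] :: js.drop (i + 1) := by
  rw [List.getD_eq_getElem js [] h]
  exact List.drop_eq_getElem_cons h

-- pushA's effect described through B's filters, on a head-sorted suffix
theorem pushA_filter (js : List (List Int)) (time : Int)
    (hs : js.Pairwise (fun a b => a.getD 0 0 ≤ b.getD 0 0)) :
    ∀ i heap, i ≤ js.length →
      i ≤ (pushA js js.length time i heap).1 ∧
      (pushA js js.length time i heap).1 ≤ js.length ∧
      (js.drop (pushA js js.length time i heap).1).map pairOf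
        = ((js.drop i).map pairOf).filter (fun p => decide (time < p.1)) ∧
      (pushA js js.length time i heap).2.Perm
        (heap ++ (((js.drop i).map pairOf).filter (fun p => decide (p.1 ≤ time))).map
          (fun p => (p.2, p.1))) := by
  intro i
  induction' hfi : js.length - i using Nat.strong_induction_on with k ih generalizing i
  intro heap hi
  rw [pushA]
  split
  · rename_i hc
    obtain ⟨hin, hle⟩ := hc
    have hdrop := drop_cons_getD js i hin
    obtain ⟨ih1, ih2, ih3, ih4⟩ := ih (js.length - (i + 1)) (by omega) (i + 1)
      rfl (heapPush ((js.getD i []).getD 1 0, (js.getD i []).getD 0 0) heap) (by omega)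
    refine ⟨by omega, ih2, ?_, ?_⟩
    · rw [ih3, hdrop, List.map_cons, List.filter_cons_of_neg
        (by simp only [pairOf, decide_eq_true_eq]; omega)]
    · rw [hdrop, List.map_cons, List.filter_cons_of_pos
        (by simp only [pairOf, decide_eq_true_eq]; omega), List.map_cons]
      refine ih4.trans ?_
      refine (((heapPush_perm _ heap).append_right _).trans ?_)
      simpa only [pairOf] using
        (List.perm_middle (a := ((js.getD i []).getD 1 0, (js.getD i []).getD 0 0))
          (l₁ := heap)
          (l₂ := (((js.drop (i+1)).map pairOf).filter (fun p => decide (p.1 ≤ time))).map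
            (fun p => (p.2, p.1)))).symm
  · rename_i hc
    refine ⟨le_refl i, hi, ?_, ?_⟩
    · by_cases hin : i < js.length
      · have hle : ¬ (js.getD i []).getD 0 0 ≤ time := by tauto
        have hdrop := drop_cons_getD js i hin
        have hall : ∀ p ∈ (js.drop i).map pairOf, time < p.1 := by
          intro p hp
          obtain ⟨j, hj, rfl⟩ := List.mem_map.mp hp
          rw [hdrop] at hj
          rcases List.mem_cons.mp hj with rfl | hj
          · simp only [pairOf]; omega
          · have hpw := (hs.sublist (List.drop_sublist i js))
            rw [hdrop] at hpw
            have := (List.pairwise_cons.mp hpw).1 j hj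
            simp only [pairOf] at this ⊢; omega
        rw [List.filter_eq_self.mpr (fun p hp => by simpa using hall p hp)]
      · have : js.drop i = [] := List.drop_eq_nil_of_le (by omega)
        simp [this]
    · by_cases hin : i < js.length
      · have hle : ¬ (js.getD i []).getD 0 0 ≤ time := by tauto
        have hdrop := drop_cons_getD js i hin
        have hall : ∀ p ∈ (js.drop i).map pairOf, ¬ (decide (p.1 ≤ time) = true) := by
          intro p hp
          obtain ⟨j, hj, rfl⟩ := List.mem_map.mp hp
          rw [hdrop] at hj
          rcases List.mem_cons.mp hj with rfl | hj
          · simp only [pairOf, decide_eq_true_eq]; omega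
          · have hpw := (hs.sublist (List.drop_sublist i js))
            rw [hdrop] at hpw
            have := (List.pairwise_cons.mp hpw).1 j hj
            simp only [pairOf, decide_eq_true_eq] at this ⊢; omega
        rw [List.filter_eq_nil_iff.mpr hall]
        simp
      · have : js.drop i = [] := List.drop_eq_nil_of_le (by omega)
        simp [this]

theorem pushA_pairwise (js : List (List Int)) (n : Nat) (time : Int) :
    ∀ i heap, heap.Pairwise pLe → (pushA js n time i heap).2.Pairwise pLe := by
  intro i
  induction' hfi : n - i using Nat.strong_induction_on with k ih generalizing i
  intro heap hs
  rw [pushA]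
  split
  · exact ih (n - (i + 1)) (by omega) (i + 1) rfl _ (heapPush_pairwise _ _ hs)
  · exact hs

-- the two loops agree step for step
theorem loop_eq (js : List (List Int))
    (hs : js.Pairwise (fun a b => a.getD 0 0 ≤ b.getD 0 0)) :
    ∀ fuel i heap waiting time total, i ≤ js.length → heap.Pairwise pLe → heap.Perm waiting →
      outerA js js.length fuel i heap time total
        = loopB fuel ((js.drop i).map pairOf) waiting time total := by
  intro fuel
  induction fuel with
  | zero => intro _ _ _ _ _ _ _ _; rfl
  | succ f ih =>
    intro i heap waiting time total hi hsp hperm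
    obtain ⟨p1, p2, p3, p4⟩ := pushA_filter js time hs i heap hi
    have hspA := pushA_pairwise js js.length time i heap hsp
    have hwperm : (pushA js js.length time i heap).2.Perm
        (waiting ++ (((js.drop i).map pairOf).filter (fun p => decide (p.1 ≤ time))).map
          (fun p => (p.2, p.1))) :=
      p4.trans (hperm.append_right _)
    rw [outerA]
    simp only [loopB]
    by_cases hc : i < js.length ∨ heap ≠ []
    · rw [if_pos hc]
      rcases hA : pushA js js.length time i heap with ⟨i', heapA⟩
      rw [hA] at p1 p2 p3 p4 hspA hwperm
      cases heapA with
      | cons hd tl =>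
        have hwne : waiting ++ (((js.drop i).map pairOf).filter
            (fun p => decide (p.1 ≤ time))).map (fun p => (p.2, p.1)) ≠ [] := by
          intro hnil
          rw [hnil] at hwperm
          exact absurd hwperm.eq_nil (by simp)
        obtain ⟨m, hmin, hmem, hmin2⟩ := min2?_spec _ hwne
        have hmA : m ∈ hd :: tl := hwperm.mem_iff.mpr hmem
        have hmeq : m = hd := by
          refine pLe_antisymm ?_ ?_
          · exact hmin2 hd (hwperm.mem_iff.mp List.mem_cons_self)
          · rcases List.mem_cons.mp hmA with rfl | hmtl
            · exact pLe_refl m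
            · exact (List.pairwise_cons.mp hspA).1 m hmtl
        have herase : ((waiting ++ (((js.drop i).map pairOf).filter
            (fun p => decide (p.1 ≤ time))).map (fun p => (p.2, p.1))).erase m).Perm tl := by
          have := (hwperm.erase (a := m))
          rw [hmeq] at this ⊢
          simpa [List.erase_cons_head] using this.symm
        rcases hd with ⟨d, r⟩
        rw [hmin]
        dsimp only
        rw [PySem.List.remove?_eq_some_erase _ m hmem, Option.getD_some, ← p3]
        subst hmeq
        exact ih i' tl _ (time + d) (total + (time + d - r)) p2
          (List.pairwise_cons.mp hspA).2 herase.symm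
      | nil =>
        have hwnil : waiting ++ (((js.drop i).map pairOf).filter
            (fun p => decide (p.1 ≤ time))).map (fun p => (p.2, p.1)) = [] :=
          hwperm.symm.eq_nil
        rw [hwnil]
        have harr : (((js.drop i).map pairOf).filter (fun p => decide (p.1 ≤ time))) = [] := by
          rcases List.append_eq_nil_iff.mp hwnil with ⟨_, h2⟩
          exact List.map_eq_nil_iff.mp h2
        have hheap : heap = [] := by
          rw [harr] at p4
          simpa using p4.symm.eq_nil
        have hin : i < js.length := by
          rcases hc with h | h
          · exact h
          · exact absurd hheap h
        have hrest : ((js.drop i).map pairOf).filter (fun p => decide (time < p.1))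
            = (js.drop i).map pairOf := by
          apply List.filter_eq_self.mpr
          intro p hp
          by_contra hnp
          have : p ∈ ((js.drop i).map pairOf).filter (fun p => decide (p.1 ≤ time)) := by
            refine List.mem_filter.mpr ⟨hp, ?_⟩
            simp only [decide_eq_true_eq] at hnp ⊢; omega
          rw [harr] at this
          exact absurd this (List.not_mem_nil)
        have hii : i' = i := by
          have hlen := congrArg List.length (p3.trans hrest)
          simp only [List.length_map, List.length_drop] at hlen
          omega
        have hdrop := drop_cons_getD js i hin
        rw [hrest, hdrop, List.map_cons]
        simp only [PySem.List.min2?]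
        rw [← List.map_cons, ← hdrop, hii]
        have := ih i [] [] ((pairOf (js.getD i [])).1) total (by omega)
          List.Pairwise.nil (List.Perm.refl _)
        simpa [pairOf] using this
    · rw [if_neg hc]
      push Not at hc
      obtain ⟨hge, hnil⟩ := hc
      have : js.drop i = [] := List.drop_eq_nil_of_le (by omega)
      rw [this]
      subst hnil
      have : waiting = [] := hperm.symm.eq_nil
      subst this
      rfl

-- the Decidable instance the ports elaborate sorted with is the LinearOrder one
theorem sorted_inst (jobs : List (List Int)) :
    PySem.List.sorted jobs (fun x => x) false
      = @PySem.List.sorted _ _ LinearOrder.toPartialOrder.toLT LinearOrder.toDecidableLT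
          jobs (fun x => x) false := by
  congr 1

theorem sorted_lex (jobs : List (List Int)) :
    (PySem.List.sorted jobs (fun x => x) false).Pairwise (fun a b => a ≤ b) := by
  rw [sorted_inst]
  exact PySem.List.sorted_pairwise jobs _

theorem cons_le_head (x y : Int) (xs ys : List Int) (h : ¬ (y::ys) < (x::xs)) : x ≤ y := by
  by_contra hxy
  exact h (List.lt_iff_lex_lt .. |>.mpr (List.Lex.rel (by omega)))

theorem sorted_headLe (jobs : List (List Int)) (hpre : ∀ j ∈ jobs, 2 ≤ j.length) :
    (PySem.List.sorted jobs (fun x => x) false).Pairwise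
      (fun a b => a.getD 0 0 ≤ b.getD 0 0) := by
  refine (sorted_lex jobs).imp_of_mem ?_
  intro a b ha hb hab
  have h2a : 2 ≤ a.length := hpre a ((PySem.List.mem_sorted _ _ _ _).mp ha)
  have h2b : 2 ≤ b.length := hpre b ((PySem.List.mem_sorted _ _ _ _).mp hb)
  match a, b with
  | x :: xs, y :: ys =>
    have : ¬ (y::ys) < (x::xs) := not_lt.mpr hab
    simpa using cons_le_head x y xs ys this

theorem solution_eq (jobs : List (List Int)) (hpre : Pre_solution jobs) :
    solution jobs = solution_alt jobs := by
  simp only [solution, solution_alt]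
  congr 1
  have hs := sorted_headLe jobs hpre.2
  simpa using loop_eq _ hs (2 * (PySem.List.sorted jobs (fun x => x) false).length + 1)
    0 [] [] 0 0 (by omega) List.Pairwise.nil (List.Perm.refl _)

-- ===== VERDICT (by name: the statement is the Claim_ definition above) =====
theorem solution_spec : Claim_equal_solution := by
  intro jobs _ hpre
  exact solution_eq jobs hpre
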